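-- pv_equiv track=rewrite | github.com/letzgorats/Leetcode | leetcode/2419/Longest Subarray With Maximum Bitwise AND.py | longestSubarray
-- ===== SOURCE A (Python) =====
-- from typing import List
--
-- def longestSubarray(nums: List[int]) -> int:
--
--     max_val = max(nums)
--
--     ans, cur = 0, 0
--     for i in range(len(nums)):
--         if nums[i] >= max_val:
--             cur += 1
--         else:
--             ans = max(ans, cur)
--             cur = 0
--
--     return max(ans, cur)
-- ===== SOURCE B (Python) =====
-- def longestSubarray(nums):
--     max_val = max(nums)
--     n = len(nums)
--     sep = [-1] + [i for i, x in enumerate(nums) if x != max_val] + [n]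
--     return max(b - a - 1 for a, b in zip(sep, sep[1:]))
-- ===== Notes on version B (the rewrite author's own statement) =====
-- stated objective: alternative
-- what changed: Replaces the running-counter-with-reset loop by a sentinel-gap computation: collect the indices of non-maximal elements (with sentinels -1 and n) and return the maximum gap between consecutive sentinels minus one.
import Mathlib
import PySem

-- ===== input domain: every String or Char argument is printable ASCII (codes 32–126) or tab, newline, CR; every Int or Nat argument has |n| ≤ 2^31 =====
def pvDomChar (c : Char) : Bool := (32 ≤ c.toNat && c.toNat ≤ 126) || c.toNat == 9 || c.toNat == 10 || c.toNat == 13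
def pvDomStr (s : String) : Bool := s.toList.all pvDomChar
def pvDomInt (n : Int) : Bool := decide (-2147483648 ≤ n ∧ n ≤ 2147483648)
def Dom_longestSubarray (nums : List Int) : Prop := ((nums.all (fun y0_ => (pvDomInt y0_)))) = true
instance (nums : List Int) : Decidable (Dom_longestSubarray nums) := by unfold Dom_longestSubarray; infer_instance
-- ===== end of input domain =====

-- B replaces A's running-counter-with-reset loop by a sentinel-gap computation over the
-- indices of non-maximal elements (objective: alternative, same cost).
-- Both programs raise ValueError (max of empty sequence) on [], excluded by Pre_.

-- ===== PORT A =====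
def longestSubarray (nums : List Int) : Int :=
  match PySem.List.max? nums (fun y => y) with
  | none => 0  -- unreachable under Pre_: max([]) raises ValueError
  | some maxVal =>
    let s := (PySem.List.pyRange 0 (PySem.List.len nums) 1).foldl
      (fun (st : Int × Int) i =>
        if maxVal ≤ PySem.List.pyGetD nums i 0 then (st.1, st.2 + 1)
        else (max st.1 st.2, 0))
      (0, 0)
    max s.1 s.2

-- ===== PORT B =====
def longestSubarray_alt (nums : List Int) : Int :=
  match PySem.List.max? nums (fun y => y) with
  | none => 0  -- unreachable under Pre_: max([]) raises ValueError
  | some maxVal =>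
    let n : Int := PySem.List.len nums
    let sep : List Int :=
      [-1] ++ ((PySem.List.enumerate nums 0).filter (fun p => p.2 != maxVal)).map (fun p => p.1) ++ [n]
    let gaps : List Int := (sep.zip (PySem.List.slice sep (some 1) none)).map (fun p => p.2 - p.1 - 1)
    match PySem.List.max? gaps (fun y => y) with
    | none => 0  -- unreachable: sep always has at least the two sentinels
    | some g => g

-- ===== PRECONDITION & SPEC =====
-- Pre_ excludes only the empty list, on which both A and B raise ValueError (max of empty sequence).
def Pre_longestSubarray (nums : List Int) : Prop := nums ≠ []
instance (nums : List Int) : Decidable (Pre_longestSubarray nums) := by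
  unfold Pre_longestSubarray; infer_instance

def pvWitness_longestSubarray : List Int := ([1])

def Spec_longestSubarray (nums : List Int) (out : Int) : Prop := out = longestSubarray_alt nums
instance (nums : List Int) (out : Int) : Decidable (Spec_longestSubarray nums out) := by unfold Spec_longestSubarray; infer_instance

-- ===== CLAIM (what is proved, stated in full; the proofs are below) =====
def Claim_equal_longestSubarray : Prop := ∀ (nums : List Int), Dom_longestSubarray nums → Pre_longestSubarray nums → Spec_longestSubarray nums (longestSubarray nums)

-- ===== LEMMAS AND PROOFS =====

-- pvH m cur xs = longest run of m in xs, where cur is the length of the run just ending.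
def pvH (m : Int) (cur : Int) : List Int → Int
  | [] => cur
  | x :: xs => if x = m then pvH m (cur + 1) xs else max cur (pvH m 0 xs)

-- list of gaps-minus-one between consecutive elements of prev :: l
def pvGaps (prev : Int) : List Int → List Int
  | [] => []
  | s :: rest => (s - prev - 1) :: pvGaps s rest

-- indices (starting at i0) of the non-m elements of xs
def pvSeps (m : Int) (xs : List Int) (i0 : Int) : List Int :=
  ((PySem.List.enumerate xs i0).filter (fun p => p.2 != m)).map (fun p => p.1)

theorem pvH_nonneg (m : Int) (cur : Int) (xs : List Int) (h : 0 ≤ cur) :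
    0 ≤ pvH m cur xs := by
  induction xs generalizing cur with
  | nil => simpa [pvH] using h
  | cons x xs ih =>
    simp only [pvH]
    split_ifs
    · exact ih _ (by omega)
    · exact le_max_of_le_right (ih 0 le_rfl)

theorem pvA_core (m : Int) (xs : List Int) (ans cur : Int)
    (hb : ∀ x ∈ xs, x ≤ m) :
    (max (xs.foldl
        (fun (st : Int × Int) x => if m ≤ x then (st.1, st.2 + 1) else (max st.1 st.2, 0)) (ans, cur)).1
      (xs.foldl
        (fun (st : Int × Int) x => if m ≤ x then (st.1, st.2 + 1) else (max st.1 st.2, 0)) (ans, cur)).2)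
      = max ans (pvH m cur xs) := by
  induction xs generalizing ans cur with
  | nil => simp [pvH]
  | cons x xs ih =>
    have hx : x ≤ m := hb x (by simp)
    by_cases hxm : x = m
    · have : m ≤ x := le_of_eq hxm.symm
      simp only [List.foldl_cons, if_pos this, pvH, if_pos hxm]
      exact ih ans (cur + 1) (fun y hy => hb y (by simp [hy]))
    · have : ¬ m ≤ x := fun h => hxm (le_antisymm hx h)
      simp only [List.foldl_cons, if_neg this, pvH, if_neg hxm]
      rw [ih (max ans cur) 0 (fun y hy => hb y (by simp [hy]))]
      omega
  
theorem foldl_max_max (gs : List Int) (a b : Int) :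
    gs.foldl max (max a b) = max a (gs.foldl max b) := by
  induction gs generalizing b with
  | nil => simp
  | cons g gs ih => simp only [List.foldl_cons, max_assoc, ih]

theorem max?_id_cons_some (c h : Int) (l : List Int)
    (hl : PySem.List.max? l (fun y => y) = some h) :
    PySem.List.max? (c :: l) (fun y => y) = some (max c h) := by
  cases l with
  | nil => simp [PySem.List.max?] at hl
  | cons g gs =>
    rw [PySem.List.max?_id_cons] at hl ⊢
    have hg : gs.foldl max g = h := by injection hl
    subst hg
    have : (g :: gs).foldl max c = max c (gs.foldl max g) := by
      simp only [List.foldl_cons, foldl_max_max]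
    rw [this]

theorem pvSeps_nil (m : Int) (i0 : Int) : pvSeps m [] i0 = [] := by
  simp [pvSeps, PySem.List.enumerate_nil]

theorem pvSeps_cons (m x : Int) (xs : List Int) (i0 : Int) :
    pvSeps m (x :: xs) i0 =
      (if x = m then [] else [i0]) ++ pvSeps m xs (i0 + 1) := by
  by_cases hxm : x = m <;>
    simp [pvSeps, PySem.List.enumerate_cons, hxm]

theorem pvB_core (m : Int) (xs : List Int) (i0 prev : Int) (hlt : prev < i0) :
    PySem.List.max? (pvGaps prev (pvSeps m xs i0 ++ [i0 + (xs.length : Int)])) (fun y => y)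
      = some (pvH m (i0 - 1 - prev) xs) := by
  induction xs generalizing i0 prev with
  | nil =>
    simp only [pvSeps_nil, List.nil_append, List.length_nil, Int.natCast_zero, add_zero, pvGaps]
    rw [PySem.List.max?_id_cons]
    simp only [List.foldl_nil, pvH, Option.some_inj]
    omega
  | cons x xs ih =>
    by_cases hxm : x = m
    · rw [pvSeps_cons, if_pos hxm]
      simp only [List.nil_append, List.length_cons]
      have harr : i0 + ((xs.length + 1 : Nat) : Int) = (i0 + 1) + (xs.length : Int) := by
        push_cast; ring
      rw [harr, ih (i0 + 1) prev (by omega)]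
      simp only [pvH, if_pos hxm]
      have harg : i0 + 1 - 1 - prev = i0 - 1 - prev + 1 := by omega
      rw [harg]
    · rw [pvSeps_cons, if_neg hxm]
      simp only [List.cons_append, List.nil_append, List.length_cons, pvGaps]
      have harr : i0 + ((xs.length + 1 : Nat) : Int) = (i0 + 1) + (xs.length : Int) := by
        push_cast; ring
      rw [harr]
      have hrec := ih (i0 + 1) i0 (by omega)
      have h0 : i0 + 1 - 1 - i0 = (0 : Int) := by omega
      rw [h0] at hrec
      rw [max?_id_cons_some _ _ _ hrec]
      simp only [pvH, if_neg hxm, Option.some_inj]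
      omega

theorem zip_map_eq_pvGaps (prev : Int) (l : List Int) :
    ((prev :: l).zip l).map (fun p : Int × Int => p.2 - p.1 - 1) = pvGaps prev l := by
  induction l generalizing prev with
  | nil => simp [pvGaps]
  | cons s rest ih => simp [List.zip, pvGaps, ← ih s]

-- ===== VERDICT (by name: the statement is the Claim_ definition above) =====
theorem longestSubarray_spec : Claim_equal_longestSubarray := by
  intro nums _hdom hpre
  unfold Spec_longestSubarray longestSubarray longestSubarray_alt
  cases hmax : PySem.List.max? nums (fun y => y) with
  | none =>
    exact absurd ((PySem.List.max?_eq_none_iff _ _).mp hmax) hpre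
  | some m =>
    have hb : ∀ x ∈ nums, x ≤ m := fun x hx => PySem.List.max?_isMax hmax x hx
    -- A side: range-fold is a fold over the list
    simp only []
    rw [PySem.List.len]
    rw [PySem.List.foldl_pyRange_zero_pyGetD' nums 0
      (fun (st : Int × Int) x => if m ≤ x then (st.1, st.2 + 1) else (max st.1 st.2, 0)) (0, 0)]
    have hA := pvA_core m nums 0 0 hb
    simp only [] at hA
    rw [hA]
    -- B side
    rw [PySem.List.slice_from_one]
    have hsep : ([-1] : List Int) ++ ((PySem.List.enumerate nums 0).filter (fun p => p.2 != m)).map (fun p => p.1) ++ [(nums.length : Int)]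
        = (-1) :: (pvSeps m nums 0 ++ [0 + (nums.length : Int)]) := by
      simp [pvSeps]
    rw [hsep]
    simp only [List.tail_cons]
    rw [zip_map_eq_pvGaps]
    rw [pvB_core m nums 0 (-1) (by omega)]
    have h0 : (0 : Int) - 1 - (-1) = 0 := by omega
    rw [h0]
    show max 0 (pvH m 0 nums) = pvH m 0 nums
    have hnn := pvH_nonneg m 0 nums le_rfl
    omega
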